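-- pv_equiv track=rewrite | github.com/xahlee/xah_delete_dup_files | temp_junk/del_dup_python/Genpair114.py | genpair
-- ===== SOURCE A (Python) =====
-- def genpair (partiSet):
--     result={}
--     for head in range(len(partiSet)-1):
--         for tail in range(head+1,len(partiSet)):
--             for ii in partiSet[head]:
--                 for jj in partiSet[tail]:
--                     result["%d,%d"%(ii,jj)]=(ii,jj)
--     return result
-- ===== SOURCE B (Python) =====
-- def genpair(partiSet):
--     # Recursion on the block list: pair the first block against every later
--     # block, then merge in the pairs generated among the remaining blocks.
--     if not partiSet:
--         return {}
--     head, rest = partiSet[0], partiSet[1:]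
--     result = {'%d,%d' % (a, b): (a, b) for t in rest for a in head for b in t}
--     result.update(genpair(rest))
--     return result
-- ===== Notes on version B (the rewrite author's own statement) =====
-- stated objective: alternative
-- what changed: Replaces A's iterative quadruple loop over index ranges mutating one dict with a structural recursion on the block list: pair the head block against each later block via a dict comprehension, recurse on the tail, and merge the two dicts with dict.update.
import Mathlib
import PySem

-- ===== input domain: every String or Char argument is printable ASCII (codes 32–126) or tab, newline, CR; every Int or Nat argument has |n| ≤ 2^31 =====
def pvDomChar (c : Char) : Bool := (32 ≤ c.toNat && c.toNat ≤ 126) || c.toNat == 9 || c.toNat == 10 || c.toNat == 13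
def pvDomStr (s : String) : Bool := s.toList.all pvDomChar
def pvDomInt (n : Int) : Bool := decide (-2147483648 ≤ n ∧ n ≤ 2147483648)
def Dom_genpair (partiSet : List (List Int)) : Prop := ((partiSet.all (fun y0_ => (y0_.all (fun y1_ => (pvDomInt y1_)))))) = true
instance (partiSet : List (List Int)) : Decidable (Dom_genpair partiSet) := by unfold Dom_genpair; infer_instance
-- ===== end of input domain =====

-- B replaces A's iterative quadruple index-range loop over one mutated dict with a
-- structural recursion on the block list (head-vs-rest comprehension, recurse, merge
-- with dict.update); same cost, a different decomposition.

-- ===== PORT A =====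
def genpair (partiSet : List (List Int)) : List (String × Int × Int) :=
  ((PySem.List.pyRange 0 ((partiSet.length : Int) - 1) 1).foldl (fun result head =>
    (PySem.List.pyRange (head + 1) (partiSet.length : Int) 1).foldl (fun result tail =>
      (PySem.List.pyGetD partiSet head []).foldl (fun result ii =>
        (PySem.List.pyGetD partiSet tail []).foldl (fun result jj =>
          result.insert (PySem.Int.toStr ii ++ "," ++ PySem.Int.toStr jj) (ii, jj)) result) result) result)
    (PySem.Dict.empty : PySem.Dict String (Int × Int))).items

-- ===== PORT B =====
def genpair_alt : List (List Int) → List (String × Int × Int)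
  | [] => []
  | head :: rest =>
      let d : PySem.Dict String (Int × Int) :=
        PySem.Dict.ofList (rest.flatMap (fun t => head.flatMap (fun a => t.map (fun b =>
          (PySem.Int.toStr a ++ "," ++ PySem.Int.toStr b, (a, b))))))
      (d.update (genpair_alt rest)).items

-- ===== PRECONDITION & SPEC =====
def Spec_genpair (partiSet : List (List Int)) (out : List (String × Int × Int)) : Prop := out = genpair_alt partiSet
instance (partiSet : List (List Int)) (out : List (String × Int × Int)) : Decidable (Spec_genpair partiSet out) := by unfold Spec_genpair; infer_instance

-- ===== CLAIM (what is proved, stated in full; the proofs are below) =====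
def Claim_equal_genpair : Prop := ∀ (partiSet : List (List Int)), Dom_genpair partiSet → Spec_genpair partiSet (genpair partiSet)

-- ===== LEMMAS AND PROOFS =====

-- one (key, value) entry as both programs build it
def kvOf (a b : Int) : String × Int × Int :=
  (PySem.Int.toStr a ++ "," ++ PySem.Int.toStr b, (a, b))

-- all entries produced for one head block against one tail block
def crossKV (H T : List Int) : List (String × Int × Int) :=
  H.flatMap (fun a => T.map (kvOf a))

-- the full entry sequence, structurally over the list of blocks
def seqTail : List (List Int) → List (String × Int × Int)
  | [] => []
  | H :: TT => TT.flatMap (crossKV H) ++ seqTail TT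

-- the two inner loops of A (over one head block, one tail block) are an update by crossKV
theorem inner_cross (H T : List Int) (r : PySem.Dict String (Int × Int)) :
    H.foldl (fun r ii => T.foldl (fun r jj =>
        r.insert (PySem.Int.toStr ii ++ "," ++ PySem.Int.toStr jj) (ii, jj)) r) r
      = r.update (crossKV H T) := by
  induction H generalizing r with
  | nil => rfl
  | cons a H ih =>
      simp only [List.foldl_cons, crossKV, List.flatMap_cons, PySem.Dict.update,
        List.foldl_append, ih, List.foldl_map]
      rfl

-- folding the two inner loops over a list of tail blocks is one update by the flattened sequence
theorem update_flatMap (TT : List (List Int)) (H : List Int)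
    (r : PySem.Dict String (Int × Int)) :
    TT.foldl (fun r T => H.foldl (fun r ii => T.foldl (fun r jj =>
        r.insert (PySem.Int.toStr ii ++ "," ++ PySem.Int.toStr jj) (ii, jj)) r) r) r
      = r.update (TT.flatMap (crossKV H)) := by
  induction TT generalizing r with
  | nil => rfl
  | cons T TT ih =>
      rw [List.foldl_cons, inner_cross, List.flatMap_cons, ih]
      simp only [PySem.Dict.update, List.foldl_append]

-- A's outer loop, related to the suffix of blocks still to be processed
theorem outer_loop (t : List (List Int)) :
    ∀ (partiSet : List (List Int)) (a : Int) (r : PySem.Dict String (Int × Int)),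
    0 ≤ a → partiSet.drop a.toNat = t →
    (PySem.List.pyRange a ((partiSet.length : Int) - 1) 1).foldl (fun result head =>
      (PySem.List.pyRange (head + 1) (partiSet.length : Int) 1).foldl (fun result tail =>
        (PySem.List.pyGetD partiSet head []).foldl (fun result ii =>
          (PySem.List.pyGetD partiSet tail []).foldl (fun result jj =>
            result.insert (PySem.Int.toStr ii ++ "," ++ PySem.Int.toStr jj) (ii, jj)) result) result) result) r
      = r.update (seqTail t) := by
  induction t with
  | nil =>
      intro partiSet a r ha hdrop
      have hlen : partiSet.length ≤ a.toNat := List.drop_eq_nil_iff.mp hdrop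
      have hempty : PySem.List.pyRange a ((partiSet.length : Int) - 1) 1 = [] := by
        rw [PySem.List.pyRange_one]
        have : ((partiSet.length : Int) - 1 - a).toNat = 0 := by omega
        simp [this]
      rw [hempty]
      rfl
  | cons H TT ih =>
      intro partiSet a r ha hdrop
      have hlt : a.toNat < partiSet.length := by
        rcases Nat.lt_or_ge a.toNat partiSet.length with h | h
        · exact h
        · rw [List.drop_eq_nil_iff.mpr h] at hdrop
          exact absurd hdrop.symm (List.cons_ne_nil _ _)
      have hget : PySem.List.pyGetD partiSet a [] = H := by
        rw [PySem.List.pyGetD_of_nonneg _ _ ha]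
        have h0 : partiSet[a.toNat] = H := by
          have h1 : (partiSet.drop a.toNat)[0]'(by simp [hdrop]) = H := by simp [hdrop]
          rw [List.getElem_drop] at h1
          simpa using h1
        simp [List.getD, List.getElem?_eq_getElem hlt, h0]
      have hdrop' : partiSet.drop (a + 1).toNat = TT := by
        have : (a + 1).toNat = a.toNat + 1 := by omega
        rw [this, ← List.drop_drop, hdrop]
        rfl
      by_cases hb : a < (partiSet.length : Int) - 1
      · rw [PySem.List.pyRange_one_cons hb, List.foldl_cons]
        have hinner :
            (PySem.List.pyRange (a + 1) (partiSet.length : Int) 1).foldl (fun result tail =>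
              (PySem.List.pyGetD partiSet a []).foldl (fun result ii =>
                (PySem.List.pyGetD partiSet tail []).foldl (fun result jj =>
                  result.insert (PySem.Int.toStr ii ++ "," ++ PySem.Int.toStr jj) (ii, jj)) result) result) r
              = r.update (TT.flatMap (crossKV H)) := by
          rw [hget]
          rw [PySem.List.foldl_pyRange_pyGetD' partiSet ([] : List Int)
            (fun (r : PySem.Dict String (Int × Int)) (T : List Int) =>
              H.foldl (fun r ii => T.foldl (fun r jj =>
                r.insert (PySem.Int.toStr ii ++ "," ++ PySem.Int.toStr jj) (ii, jj)) r) r)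
            r (by omega : (0:Int) ≤ a + 1)]
          rw [hdrop']
          exact update_flatMap TT H r
        rw [hinner, ih partiSet (a + 1) _ (by omega) hdrop']
        simp only [seqTail, PySem.Dict.update, List.foldl_append]
      · have hempty : PySem.List.pyRange a ((partiSet.length : Int) - 1) 1 = [] := by
          rw [PySem.List.pyRange_one]
          have : ((partiSet.length : Int) - 1 - a).toNat = 0 := by omega
          simp [this]
        rw [hempty]
        have hTT : TT = [] := by
          have h2 : partiSet.drop (a + 1).toNat = [] :=
            List.drop_eq_nil_iff.mpr (by omega)
          rw [hdrop'] at h2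
          exact h2
        subst hTT
        simp only [List.foldl_nil, seqTail, List.flatMap_nil, List.append_nil]
        rfl

-- last value stored for key k while folding an entry list left to right
def lastGet? (L : List (String × Int × Int)) (k : String) : Option (Int × Int) :=
  L.foldl (fun acc p => if p.1 = k then some p.2 else acc) none

theorem lastGet?_step (L : List (String × Int × Int)) (k : String) :
    ∀ (init : Option (Int × Int)),
    L.foldl (fun acc p => if p.1 = k then some p.2 else acc) init
      = match lastGet? L k with
        | some v => some v
        | none => init := by
  induction L using List.reverseRecOn with
  | nil => intro init; rfl
  | append_singleton L q ih =>
      intro init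
      have hlast : lastGet? (L ++ [q]) k
          = if q.1 = k then some q.2 else lastGet? L k := by
        simp [lastGet?, List.foldl_append]
      rw [List.foldl_append, List.foldl_cons, List.foldl_nil, hlast, ih init]
      by_cases hq : q.1 = k
      · simp [hq]
      · simp only [if_neg hq]

theorem lastGet?_cons (p : String × Int × Int) (L : List (String × Int × Int)) (k : String) :
    lastGet? (p :: L) k
      = match lastGet? L k with
        | some v => some v
        | none => if p.1 = k then some p.2 else none := by
  have h : lastGet? (p :: L) k
      = L.foldl (fun acc q => if q.1 = k then some q.2 else acc)
          (if p.1 = k then some p.2 else none) := rfl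
  rw [h, lastGet?_step]

-- get? after an update is the last value in the list, else the old value
theorem get?_update (L : List (String × Int × Int)) :
    ∀ (d : PySem.Dict String (Int × Int)) (k : String),
    (d.update L).get? k
      = match lastGet? L k with
        | some v => some v
        | none => d.get? k := by
  induction L with
  | nil => intro d k; rfl
  | cons p L ih =>
      intro d k
      have h0 : (d.update (p :: L)) = ((d.insert p.1 p.2).update L) := rfl
      rw [h0, ih, lastGet?_cons]
      cases h : lastGet? L k with
      | some v => rfl
      | none =>
          rw [PySem.Dict.get?_insert]
          by_cases hk : k = p.1
          · simp [hk]
          · rw [if_neg hk, if_neg (fun h' : p.1 = k => hk h'.symm)]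

-- on a nodup-keys item list, the last match is the first match
theorem lastGet?_nodup (L : List (String × Int × Int)) (k : String)
    (hnd : (L.map Prod.fst).Nodup) :
    lastGet? L k = (L.find? (fun p => p.1 == k)).map Prod.snd := by
  induction L with
  | nil => rfl
  | cons p L ih =>
      simp only [List.map_cons, List.nodup_cons] at hnd
      rw [lastGet?_cons, ih hnd.2]
      by_cases hp : p.1 = k
      · have hnone : L.find? (fun q => q.1 == k) = none := by
          rw [List.find?_eq_none]
          intro q hq hbeq
          have hq1 : q.1 = k := by simpa using hbeq
          exact absurd (by rw [hp, ← hq1]; exact List.mem_map_of_mem hq) hnd.1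
        rw [hnone, List.find?_cons_of_pos (by simpa using hp)]
        simp [hp]
      · rw [List.find?_cons_of_neg (by simpa using hp)]
        cases L.find? (fun q => q.1 == k) <;> simp [hp]

theorem lastGet?_items (d : PySem.Dict String (Int × Int)) (k : String)
    (hnd : d.keys.Nodup) : lastGet? d.items k = d.get? k := by
  have h : d.keys = d.items.map Prod.fst := rfl
  rw [lastGet?_nodup d.items k (h ▸ hnd)]
  rfl

-- keys of an update, as a set update by the listed keys
theorem keys_update (d : PySem.Dict String (Int × Int)) (L : List (String × Int × Int)) :
    (d.update L).keys = PySem.Set.update d.keys (L.map Prod.fst) :=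
  PySem.Dict.keys_foldl_insert_key L Prod.fst (fun _ p => p.2) d

-- updating with a deduplicated dict's items is the same as updating with the raw list
theorem update_ofList_items (d : PySem.Dict String (Int × Int))
    (M : List (String × Int × Int)) (hnd : d.keys.Nodup) :
    d.update (PySem.Dict.ofList M).items = d.update M := by
  apply PySem.Dict.ext
  have hndL : (d.update (PySem.Dict.ofList M).items).keys.Nodup :=
    PySem.Dict.nodup_keys_update _ _ hnd
  have hndR : (d.update M).keys.Nodup := PySem.Dict.nodup_keys_update _ _ hnd
  have hget : ∀ k, (d.update (PySem.Dict.ofList M).items).get? k = (d.update M).get? k := by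
    intro k
    rw [get?_update, get?_update,
      lastGet?_items _ k (PySem.Dict.nodup_keys_ofList M)]
    have hof : (PySem.Dict.ofList M).get? k
        = match lastGet? M k with
          | some v => some v
          | none => none := by
      show (PySem.Dict.empty.update M).get? k = _
      rw [get?_update]
      cases lastGet? M k <;> rfl
    rw [hof]
    cases lastGet? M k <;> rfl
  have hkeys : (d.update (PySem.Dict.ofList M).items).keys = (d.update M).keys := by
    rw [keys_update, keys_update]
    have hk : (PySem.Dict.ofList M).items.map Prod.fst = (PySem.Dict.ofList M).keys := rfl
    rw [hk]
    have hofk : (PySem.Dict.ofList M).keys = PySem.Set.ofList (M.map Prod.fst) := by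
      have h := keys_update PySem.Dict.empty M
      simpa [PySem.Dict.ofList, PySem.Dict.empty, PySem.Dict.keys,
        PySem.Set.update_nil_left] using h
    rw [hofk, PySem.Set.update_eq_append_filter, PySem.Set.update_eq_append_filter,
      PySem.Set.ofList_ofList]
  rw [PySem.Dict.items_eq_map_keys _ hndL ((0:Int), (0:Int)),
    PySem.Dict.items_eq_map_keys _ hndR ((0:Int), (0:Int)), hkeys]
  apply List.map_congr_left
  intro k _
  rw [PySem.Dict.getD_eq_get?_getD, PySem.Dict.getD_eq_get?_getD, hget k]

-- B's recursion computes the items of one update by the flattened sequence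
theorem alt_eq_seq (t : List (List Int)) :
    genpair_alt t = ((PySem.Dict.empty : PySem.Dict String (Int × Int)).update (seqTail t)).items := by
  induction t with
  | nil => rfl
  | cons H TT ih =>
      show (PySem.Dict.items (PySem.Dict.update (PySem.Dict.ofList
          (TT.flatMap (fun t => H.flatMap (fun a => t.map (fun b =>
            (PySem.Int.toStr a ++ "," ++ PySem.Int.toStr b, (a, b)))))))
          (genpair_alt TT))) = _
      have hL : TT.flatMap (fun t => H.flatMap (fun a => t.map (fun b =>
            (PySem.Int.toStr a ++ "," ++ PySem.Int.toStr b, (a, b)))))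
          = TT.flatMap (crossKV H) := rfl
      have hrec : genpair_alt TT = (PySem.Dict.ofList (seqTail TT)).items := ih
      rw [hL, hrec, update_ofList_items _ _ (PySem.Dict.nodup_keys_ofList _)]
      have h2 : (PySem.Dict.ofList (TT.flatMap (crossKV H))).update (seqTail TT)
          = (PySem.Dict.empty : PySem.Dict String (Int × Int)).update (seqTail (H :: TT)) := by
        simp only [PySem.Dict.ofList, PySem.Dict.update, seqTail, List.foldl_append]
      rw [h2]

-- ===== VERDICT (by name: the statement is the Claim_ definition above) =====
theorem genpair_spec : Claim_equal_genpair := by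
  intro partiSet _
  unfold Spec_genpair genpair
  rw [outer_loop partiSet partiSet 0 PySem.Dict.empty le_rfl (by rfl), alt_eq_seq]
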